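/- GENERATED by mk_final_copies.py from the proof of the farm's unit `make_block_array` (farm:make_block_array.1: Proof.lean) as the
   re-elaboration sweep compiled it — do not edit. -/
import Asan.CheckWalk
import Vorbis.Spec.Units.make_block_array

open X86 X86.User Asan Vorbis

set_option maxRecDepth 4000
set_option maxHeartbeats 4000000

namespace Vorbis.Spec.make_block_array

/-- A number below 2^31 in a 64-bit register: its low half is the number. -/
theorem part32_ofNat (i : Nat) (h : i < 2 ^ 31) : (Word.part .w32 (UInt64.ofNat i)).toNat = i := by
  rw [Asan.part32_toNat, UInt64.toNat_ofNat']
  omega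

/-- `movsxd rax, ebx` with `ebx = i`, a non-negative `int`: rax is `i`. -/
theorem sext_ofNat (i : Nat) (h : i < 2 ^ 31) :
    Word.ofBV (BitVec.signExtend 64 (Word.part .w32 (UInt64.ofNat i))) = UInt64.ofNat i := by
  apply UInt64.toNat_inj.mp
  rw [Vorbis.Spec.toNat_sext32 _ (by rw [part32_ofNat i h]; exact h), part32_ofNat i h, UInt64.toNat_ofNat']
  omega

/-- `add ebx, 1` with `ebx = i`, `i + 1` still a non-negative `int`: rbx is `i + 1`. -/
theorem inc_ofNat (i : Nat) (h : i + 1 < 2 ^ 31) :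
    Word.ofBV (Word.part .w32 (UInt64.ofNat i) + 1#32) = UInt64.ofNat (i + 1) := by
  apply UInt64.toNat_inj.mp
  rw [Vorbis.toNat_ofBV32, BitVec.toNat_add, part32_ofNat i (by omega), UInt64.toNat_ofNat']
  have e1 : (1#32).toNat = 1 := by decide
  rw [e1]
  omega

/-- `cmp ebx, r14d ; jl` with `ebx = i ≤ count`, both non-negative `int`s: the signed comparison is the comparison of numbers. -/
theorem lt_iff (i C : Nat) (r : Word) (hC : r.toNat % 2 ^ 32 = C) (hcnt : C < 2 ^ 31) (hi : i ≤ C) :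
    (Word.part .w32 (UInt64.ofNat i)).toInt < (Word.part .w32 r).toInt ↔ i < C := by
  have e1 : (Word.part .w32 (UInt64.ofNat i)).toNat = i := part32_ofNat i (by omega)
  have e2 : (Word.part .w32 r).toNat = C := by rw [Asan.part32_toNat, hC]
  rw [Vorbis.Spec.toInt_of_lt _ (by omega), Vorbis.Spec.toInt_of_lt _ (by omega), e1, e2]
  omega

/-- `lea r12, [r13 + rax*8]`: the scaled index as one number. -/
theorem mul8_ofNat (i : Nat) : UInt64.ofNat i * 8 = UInt64.ofNat (8 * i) := by
  rw [UInt64.ofNat_mul, UInt64.mul_comm]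
  rfl

/-- `movsxd rax, esi ; lea rbp, [rdi + rax*8]` with `count` a non-negative `int` and no wrap: `q = mem + 8·count`. -/
theorem add_count8 (p r : Word) (C : Nat) (hC : r.toNat % 2 ^ 32 = C) (hcnt : C < 2 ^ 31) (hp : p.toNat + 8 * C < 2 ^ 64) :
    (p + Word.ofBV (BitVec.signExtend 64 (Word.part .w32 r)) * 8).toNat = p.toNat + 8 * C := by
  have e2 : (Word.part .w32 r).toNat = C := by rw [Asan.part32_toNat, hC]
  have e8 : (8 : Word).toNat = 8 := rfl
  rw [UInt64.toNat_add, UInt64.toNat_mul, Vorbis.Spec.toNat_sext32 _ (by omega), e2, e8]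
  omega

/-- `movsxd rax, r15d ; add rbp, rax` with `size` a non-negative `int` and no wrap: the row address advances by `size`. -/
theorem add_size (q r : Word) (Z : Nat) (hZ : r.toNat % 2 ^ 32 = Z) (hsz : Z < 2 ^ 31) (hq : q.toNat + Z < 2 ^ 64) :
    (q + Word.ofBV (BitVec.signExtend 64 (Word.part .w32 r))).toNat = q.toNat + Z := by
  have e2 : (Word.part .w32 r).toNat = Z := by rw [Asan.part32_toNat, hZ]
  rw [UInt64.toNat_add, Vorbis.Spec.toNat_sext32 _ (by omega), e2]
  omega

/-- A read of 8 bytes through two 8-byte stores elsewhere (the return address of the check call, the row pointer `p[i]`). -/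
theorem readLE_two_stores (m : Mem) (a b c : Word) (x y : Nat)
    (ha : a.toNat + 8 ≤ 2 ^ 64) (hb : b.toNat + 8 ≤ 2 ^ 64) (hc : c.toNat + 8 ≤ 2 ^ 64)
    (hac : c.toNat + 8 ≤ a.toNat ∨ a.toNat + 8 ≤ c.toNat) (hbc : c.toNat + 8 ≤ b.toNat ∨ b.toNat + 8 ≤ c.toNat) :
    ((m.writeLE a 8 x).writeLE b 8 y).readLE c 8 = m.readLE c 8 := by
  rw [Mem.readLE_writeLE_disjoint_noWrap _ _ _ _ _ _ hb hc hbc, Mem.readLE_writeLE_disjoint_noWrap _ _ _ _ _ _ ha hc hac]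

end Vorbis.Spec.make_block_array

/-- `make_block_array(mem, count, size)` satisfies its contract: six pushes, one counted loop (`u_loop` / `u_loop_back`) with one
check call and one 8-byte store `p[i] = q` inside, six pops. `count` and `size` are named `C` and `Z` (atoms for `u_omega`) and
substituted back before `v_returned`. -/
theorem Vorbis.Spec.Worked.make_block_array_ok : Vorbis.Spec.make_block_array.Statement := by
  intro Lay hLay μ hμ u₀ hcode hstore8 others frames u ret he hpre
  v_entry he
  obtain ⟨hsh, hcnt, hsz, hlive⟩ := hpre
  have hsp := hsh.rsp
  -- `count` and `size` read unsigned, as numbers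
  obtain ⟨C, hC⟩ : ∃ C : Nat, (u.reg .rsi).toNat % 2 ^ 32 = C := ⟨_, rfl⟩
  obtain ⟨Z, hZ⟩ : ∃ Z : Nat, (u.reg .rdx).toNat % 2 ^ 32 = Z := ⟨_, rfl⟩
  rw [hC] at hcnt hlive
  rw [hZ] at hsz
  -- where the table is: one arithmetic fact (nothing is known, and nothing is stored, when count = 0)
  have hwhere : C = 0 ∨
      (0x119d40 ≤ (u.reg .rdi).toNat ∧ (u.reg .rdi).toNat + 8 * C ≤ 0xC00000 ∧
        ((u.reg .rsp).toNat + 8 ≤ (u.reg .rdi).toNat ∨ (u.reg .rdi).toNat + 8 * C ≤ 0x700000 ∨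
          0x800000 ≤ (u.reg .rdi).toNat)) := by
    rcases hlive with h0 | hl
    · exact Or.inl h0
    · by_cases hn : C = 0
      · exact Or.inl hn
      · exact Or.inr (hl.where_ hsh.inv hsh.offText (by omega))
  -- `mem + 8·count` does not wrap
  have hnowrap : (u.reg .rdi).toNat + 8 * C < 2 ^ 64 := by
    have := (u.reg .rdi).toNat_lt
    omega
  -- 0x103dc0 … 0x103de3, stb_vorbis_fixed.c:939-943: the pushes, `q = p + count`, `i = 0`
  u_walk hcode [hμ.vendor] until [Vorbis.L.make_block_array.loop1] span [Vorbis.L.textLo, Vorbis.L.textHi] side (v_side)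
  -- 0x103e02, stb_vorbis_fixed.c:943 `for (i=0; i < count; ++i)`: the loop head. What varies is generalised (ebx = i,
  -- rbp = q = mem + 8·count + i·size, the rows set so far), the exact memory is replaced by what stays true
  obtain ⟨i, q, hi, hile, hfill, hq, hqn⟩ : ∃ (i : Nat) (q : Word), s_103de3.reg .rbx = UInt64.ofNat i ∧ i ≤ C ∧
      (∀ j, j < i → s_103de3.mem.readLE (u.reg .rdi + UInt64.ofNat (8 * j)) 8 =
        (u.reg .rdi).toNat + 8 * C + j * Z) ∧
      s_103de3.reg .rbp = q ∧ q.toNat = (u.reg .rdi).toNat + 8 * C + i * Z := by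
    refine ⟨0, _, ?_, Nat.zero_le _, fun j hj => absurd hj (Nat.not_lt_zero j), w_rbp, ?_⟩
    · rw [w_rbx]
      rfl
    · rw [Vorbis.Spec.make_block_array.add_count8 _ _ C hC hcnt hnowrap]
      omega
  have hsame : Mem.SameExcept [⟨(u.reg .rsp).toNat - 80, (u.reg .rsp).toNat⟩,
      ⟨(u.reg .rdi).toNat, (u.reg .rdi).toNat + 8 * C⟩] u.mem s_103de3.mem := by
    u_same
  have hun : ShadowUntouched u.mem s_103de3.mem := by v_untouched
  have hs1 : UInt64.ofNat (s_103de3.mem.readLE (u.reg .rsp - 8) 8) = u.reg .r15 := by u_resolve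
  have hs2 : UInt64.ofNat (s_103de3.mem.readLE (u.reg .rsp - 16) 8) = u.reg .r14 := by u_resolve
  have hs3 : UInt64.ofNat (s_103de3.mem.readLE (u.reg .rsp - 24) 8) = u.reg .r13 := by u_resolve
  have hs4 : UInt64.ofNat (s_103de3.mem.readLE (u.reg .rsp - 32) 8) = u.reg .r12 := by u_resolve
  have hs5 : UInt64.ofNat (s_103de3.mem.readLE (u.reg .rsp - 40) 8) = u.reg .rbp := by u_resolve
  have hs6 : UInt64.ofNat (s_103de3.mem.readLE (u.reg .rsp - 48) 8) = u.reg .rbx := by u_resolve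
  have hs0 : UInt64.ofNat (s_103de3.mem.readLE (u.reg .rsp) 8) = ret := by u_resolve
  have hdf : s_103de3.flags .df = false := by
    rw [w_flags]
    simp only [X86.User.df_setStatus]
    exact he_df
  replace w_kept := w_kept.mono_all (S' := [.rbx, .rbp, .rax, .r15, .r14, .r13, .rsp, .r12, .rdi, .rcx, .rdx]) (by rfl)
  clear w_mem w_flags w_rbx w_rbp w_rax
  u_loop [i, q] (fun v => C - (v.reg .rbx).toNat)
  -- the body 0x103e02 … 0x103dff back to the head, and the exit 0x103e07 … 0x103e18
  u_walk hcode [hμ.vendor] until [Vorbis.L.make_block_array.loop1] span [Vorbis.L.textLo, Vorbis.L.textHi] side (v_side)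
  · -- 0x103df0, stb_vorbis_fixed.c:944 `p[i] = q`: the check of the store
    have hic : i < C := (Vorbis.Spec.make_block_array.lt_iff i C _ hC hcnt hile).mp hbr_103e05
    have hl : LiveIn others frames (u.reg .rdi).toNat (8 * C) := hlive.resolve_left (by omega)
    obtain ⟨hw1, hw2, hw3⟩ := hwhere.resolve_left (by omega)
    have hun' : ShadowUntouched u.mem s_103df0.mem := by v_untouched
    rw [Vorbis.Spec.make_block_array.sext_ofNat i (by omega), Vorbis.Spec.make_block_array.mul8_ofNat]
    exact hl.accSmall hsh.inv hun' _ 8 (by decide) (by u_omega) (by u_omega)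
  · -- 0x103df5 `mov [r12], rbp`: the store misses the image's text (side_code)
    have hic : i < C := (Vorbis.Spec.make_block_array.lt_iff i C _ hC hcnt hile).mp hbr_103e05
    obtain ⟨hw1, hw2, hw3⟩ := hwhere.resolve_left (by omega)
    rw [Vorbis.Spec.make_block_array.sext_ofNat i (by omega), Vorbis.Spec.make_block_array.mul8_ofNat]
    right
    u_omega
  · -- 0x103dff → 0x103e02: the back edge
    have hic : i < C := (Vorbis.Spec.make_block_array.lt_iff i C _ hC hcnt hile).mp hbr_103e05
    obtain ⟨hw1, hw2, hw3⟩ := hwhere.resolve_left (by omega)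
    have hiz : i * Z ≤ 2 ^ 31 * 2 ^ 31 := Nat.mul_le_mul (by omega) (by omega)
    rw [Vorbis.Spec.make_block_array.sext_ofNat i (by omega), Vorbis.Spec.make_block_array.mul8_ofNat] at w_mem
    u_loop_back [i + 1, q + Word.ofBV (BitVec.signExtend 64 (Word.part Width.w32 (u.reg Reg.rdx)))]
    · -- ebx = i + 1
      rw [w_rbx]
      exact Vorbis.Spec.make_block_array.inc_ofNat i (by omega)
    · -- i + 1 ≤ count
      omega
    · -- the rows set so far: row i is the store of this round, the others are read through it
      intro j hj
      by_cases hji : j = i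
      · subst hji
        rw [w_mem, Mem.readLE_writeLE_same _ _ _ _ (by decide), hqn]
        omega
      · have ej : (u.reg .rdi + UInt64.ofNat (8 * j)).toNat = (u.reg .rdi).toNat + 8 * j :=
          X86.User.toNat_add_ofNat _ _ (by omega)
        have ei : (u.reg .rdi + UInt64.ofNat (8 * i)).toNat = (u.reg .rdi).toNat + 8 * i :=
          X86.User.toNat_add_ofNat _ _ (by omega)
        have es : (u.reg .rsp - 64).toNat = (u.reg .rsp).toNat - 64 := by u_omega
        rw [w_mem, Vorbis.Spec.make_block_array.readLE_two_stores _ _ _ _ _ _ (by omega) (by omega) (by omega)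
          (by omega) (by omega)]
        exact hfill j (by omega)
    · -- q = mem + 8·count + (i + 1)·size
      rw [Vorbis.Spec.make_block_array.add_size q _ Z hZ hsz (by omega), hqn, Nat.add_mul]
      omega
    · -- still no store to the shadow
      v_untouched
    · -- the six saved registers and the return address: the two stores of the body are elsewhere
      u_frame hs1
    · u_frame hs2
    · u_frame hs3
    · u_frame hs4
    · u_frame hs5
    · u_frame hs6
    · u_frame hs0
    · -- the direction flag: the check kept it, the `add`s wrote status flags only
      rw [w_flags]
      simp only [X86.User.df_setStatus]
      assumption
    · -- the measure
      rw [w_rbx, Vorbis.Spec.make_block_array.inc_ofNat i (by omega)]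
      u_omega
  · -- 0x103e07 … 0x103e18, stb_vorbis_fixed.c:948: the exit, walked to the `ret`
    have hge : ¬ i < C := fun h => hbr_103e05 ((Vorbis.Spec.make_block_array.lt_iff i C _ hC hcnt hile).mpr h)
    refine ReachVia.done (Or.inl ?_)
    subst hC hZ
    v_returned
    -- the post: rax = mem, no store to the shadow, every row pointer set (i = count at the exit)
    refine ⟨w_rax, ?_, ?_⟩
    · rw [w_mem]
      exact hun
    · intro j hj
      rw [w_mem]
      exact hfill j (by omega)
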